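-- pv_equiv track=rewrite | github.com/JaemooJung/PiscineDjango | 01/ex05/all_in.py | find_location
-- ===== SOURCE A (Python) =====
-- def find_location(query):
--     states = {
--     "Oregon": "OR",
--     "Alabama": "AL",
--     "New Jersey": "NJ",
--     "Colorado": "CO"
--     }
--
--     capital_cities = {
--         "OR": "Salem",
--         "AL": "Montgomery",
--         "NJ": "Trenton",
--         "CO": "Denver"
--     }
--
--     query = query.strip()
--     if query == '':
--         return None
--     for state, abbrev in states.items():
--         if state.lower() == query.lower():
--             capital = capital_cities[abbrev]
--             return f"{capital} is the capital of {state}"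
--     for abbrev, capital in capital_cities.items():
--         if capital.lower() == query.lower():
--             for state, state_abbrev in states.items():
--                 if state_abbrev == abbrev:
--                     return f"{capital} is the capital of {state}"
--     return f"{query} is neither a capital city nor a state"
-- ===== SOURCE B (Python) =====
-- def find_location(query):
--     data = [
--         ("Oregon", "Salem"),
--         ("Alabama", "Montgomery"),
--         ("New Jersey", "Trenton"),
--         ("Colorado", "Denver"),
--     ]
--     lookup = {}
--     for state, capital in data:
--         result = f"{capital} is the capital of {state}"
--         lookup[state.lower()] = result
--         lookup[capital.lower()] = result
--     query = query.strip()
--     if query == '':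
--         return None
--     return lookup.get(query.lower(), f"{query} is neither a capital city nor a state")
-- ===== Notes on version B (the rewrite author's own statement) =====
-- stated objective: simpler
-- what changed: Replaced the three scanning loops (state scan, capital scan with an inner abbreviation scan) by building one lowercase-keyed lookup table once and doing a single dict.get with the not-found message as default.
import Mathlib
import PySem

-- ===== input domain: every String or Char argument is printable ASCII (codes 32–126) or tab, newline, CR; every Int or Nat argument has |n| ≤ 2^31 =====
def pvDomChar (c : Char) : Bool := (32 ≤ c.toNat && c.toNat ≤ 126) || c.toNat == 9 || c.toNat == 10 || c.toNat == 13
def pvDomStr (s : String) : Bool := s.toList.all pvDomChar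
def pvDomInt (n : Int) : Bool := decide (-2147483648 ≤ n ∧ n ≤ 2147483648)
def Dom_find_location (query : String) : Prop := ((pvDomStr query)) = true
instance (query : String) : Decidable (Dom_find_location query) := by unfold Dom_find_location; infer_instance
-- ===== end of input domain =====

-- B replaces A's three scanning loops by one lowercase-keyed lookup table and a single dict.get (objective: simpler).

-- ===== PORT A =====
def pvStatesA : PySem.Dict String String :=
  PySem.Dict.ofList [("Oregon", "OR"), ("Alabama", "AL"), ("New Jersey", "NJ"), ("Colorado", "CO")]

def pvCapitalsA : PySem.Dict String String :=
  PySem.Dict.ofList [("OR", "Salem"), ("AL", "Montgomery"), ("NJ", "Trenton"), ("CO", "Denver")]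

-- first loop: scan states.items() for state.lower() == query.lower()
-- (capital_cities[abbrev] always succeeds here; ported with getD "" — the key is always present)
def pvScanStates (items : List (String × String)) (ql : String) : Option String :=
  match items with
  | [] => none
  | (state, ab) :: rest =>
    if PySem.Str.lower state = ql then
      some ((pvCapitalsA.getD ab "") ++ " is the capital of " ++ state)
    else pvScanStates rest ql

-- inner loop: scan states.items() for state_abbrev == abbrev
def pvScanAbbrev (items : List (String × String)) (ab capital : String) : Option String :=
  match items with
  | [] => none
  | (state, state_abbrev) :: rest =>
    if state_abbrev = ab then some (capital ++ " is the capital of " ++ state)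
    else pvScanAbbrev rest ab capital

-- second loop: scan capital_cities.items() for capital.lower() == query.lower()
def pvScanCapitals (items : List (String × String)) (ql : String) : Option String :=
  match items with
  | [] => none
  | (ab, capital) :: rest =>
    if PySem.Str.lower capital = ql then
      match pvScanAbbrev pvStatesA.items ab capital with
      | some r => some r
      | none => pvScanCapitals rest ql
    else pvScanCapitals rest ql

def find_location (query : String) : Option String :=
  let q := PySem.Str.strip query
  if q = "" then none
  else
    match pvScanStates pvStatesA.items (PySem.Str.lower q) with
    | some r => some r
    | none =>
      match pvScanCapitals pvCapitalsA.items (PySem.Str.lower q) with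
      | some r => some r
      | none => some (q ++ " is neither a capital city nor a state")

-- ===== PORT B =====
def pvDataB : List (String × String) :=
  [("Oregon", "Salem"), ("Alabama", "Montgomery"), ("New Jersey", "Trenton"), ("Colorado", "Denver")]

def pvLookupB : PySem.Dict String String :=
  pvDataB.foldl
    (fun d p =>
      let result := p.2 ++ " is the capital of " ++ p.1
      (d.insert (PySem.Str.lower p.1) result).insert (PySem.Str.lower p.2) result)
    PySem.Dict.empty

def find_location_alt (query : String) : Option String :=
  let q := PySem.Str.strip query
  if q = "" then none
  else some (pvLookupB.getD (PySem.Str.lower q) (q ++ " is neither a capital city nor a state"))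

-- ===== PRECONDITION & SPEC =====
def Spec_find_location (query : String) (out : Option String) : Prop := out = find_location_alt query
instance (query : String) (out : Option String) : Decidable (Spec_find_location query out) := by unfold Spec_find_location; infer_instance

-- ===== CLAIM (what is proved, stated in full; the proofs are below) =====
def Claim_equal_find_location : Prop := ∀ (query : String), Dom_find_location query → Spec_find_location query (find_location query)

-- ===== LEMMAS AND PROOFS =====

-- lowercased literals, evaluated once
theorem pv_low1 : PySem.Str.lower "Oregon" = "oregon" := by decide
theorem pv_low2 : PySem.Str.lower "Alabama" = "alabama" := by decide
theorem pv_low3 : PySem.Str.lower "New Jersey" = "new jersey" := by decide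
theorem pv_low4 : PySem.Str.lower "Colorado" = "colorado" := by decide
theorem pv_low5 : PySem.Str.lower "Salem" = "salem" := by decide
theorem pv_low6 : PySem.Str.lower "Montgomery" = "montgomery" := by decide
theorem pv_low7 : PySem.Str.lower "Trenton" = "trenton" := by decide
theorem pv_low8 : PySem.Str.lower "Denver" = "denver" := by decide

theorem pv_itemsS : pvStatesA.items = [("Oregon", "OR"), ("Alabama", "AL"), ("New Jersey", "NJ"), ("Colorado", "CO")] := by decide
theorem pv_itemsC : pvCapitalsA.items = [("OR", "Salem"), ("AL", "Montgomery"), ("NJ", "Trenton"), ("CO", "Denver")] := by decide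

-- both sides as one explicit case split on the lowered stripped query
theorem pv_eq (query : String) : find_location query = find_location_alt query := by
  unfold find_location find_location_alt
  by_cases h0 : PySem.Str.strip query = ""
  · simp [h0]
  · simp only [h0, if_false]
    generalize (PySem.Str.strip query ++ " is neither a capital city nor a state") = dflt
    generalize PySem.Str.lower (PySem.Str.strip query) = l
    by_cases h1 : l = "oregon"
    · subst h1; rfl
    · by_cases h2 : l = "alabama"
      · subst h2; rfl
      · by_cases h3 : l = "new jersey"
        · subst h3; rfl
        · by_cases h4 : l = "colorado"
          · subst h4; rfl
          · by_cases h5 : l = "salem"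
            · subst h5; rfl
            · by_cases h6 : l = "montgomery"
              · subst h6; rfl
              · by_cases h7 : l = "trenton"
                · subst h7; rfl
                · by_cases h8 : l = "denver"
                  · subst h8; rfl
                  · simp [pvScanStates, pvScanCapitals, pv_itemsS, pv_itemsC, pvLookupB, pvDataB,
                      List.foldl, pv_low1, pv_low2, pv_low3, pv_low4, pv_low5,
                      pv_low6, pv_low7, pv_low8, PySem.Dict.getD_insert, PySem.Dict.getD_empty,
                      Ne.symm h1, Ne.symm h2, Ne.symm h3, Ne.symm h4, Ne.symm h5, Ne.symm h6,
                      Ne.symm h7, Ne.symm h8, h1, h2, h3, h4, h5, h6, h7, h8]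

-- ===== VERDICT (by name: the statement is the Claim_ definition above) =====
theorem find_location_spec : Claim_equal_find_location := by
  intro query _
  unfold Spec_find_location
  exact pv_eq query
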